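-- pv_equiv track=rewrite | github.com/SamsonSir/opc-custom-skills | skills/video-content-extractor/scripts/extract_long_image.py | calculate_slices
-- ===== SOURCE A (Python) =====
-- MAX_SLICE_HEIGHT = 2500  # 单张最大高度（像素）
--
-- OVERLAP = 100  # 切分重叠区域（避免文字被截断）
--
-- def calculate_slices(total_height):
--     """计算切分位置"""
--     slices = []
--     start = 0
--
--     while start < total_height:
--         end = min(start + MAX_SLICE_HEIGHT, total_height)
--         slices.append((start, end))
--
--         # 下一张起始位置（考虑重叠）
--         if end < total_height:
--             start = end - OVERLAP
--         else:
--             break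
--
--     return slices
-- ===== SOURCE B (Python) =====
-- MAX_SLICE_HEIGHT = 2500  # 单张最大高度（像素）
--
-- OVERLAP = 100  # 切分重叠区域（避免文字被截断）
--
--
-- def calculate_slices(total_height):
--     """计算切分位置"""
--     if total_height <= 0:
--         return []
--     step = MAX_SLICE_HEIGHT - OVERLAP
--     # number of extra slices beyond the first: ceil((total_height - MAX) / step)
--     extra = max(0, -(-(total_height - MAX_SLICE_HEIGHT) // step))
--     return [(i * step, min(i * step + MAX_SLICE_HEIGHT, total_height))
--             for i in range(extra + 1)]
-- ===== Notes on version B (the rewrite author's own statement) =====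
-- stated objective: simpler
-- what changed: Replaces A's condition/break while-loop by computing the slice count up front with a ceiling division and generating each (start, end) interval directly by index in one comprehension.
import Mathlib
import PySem

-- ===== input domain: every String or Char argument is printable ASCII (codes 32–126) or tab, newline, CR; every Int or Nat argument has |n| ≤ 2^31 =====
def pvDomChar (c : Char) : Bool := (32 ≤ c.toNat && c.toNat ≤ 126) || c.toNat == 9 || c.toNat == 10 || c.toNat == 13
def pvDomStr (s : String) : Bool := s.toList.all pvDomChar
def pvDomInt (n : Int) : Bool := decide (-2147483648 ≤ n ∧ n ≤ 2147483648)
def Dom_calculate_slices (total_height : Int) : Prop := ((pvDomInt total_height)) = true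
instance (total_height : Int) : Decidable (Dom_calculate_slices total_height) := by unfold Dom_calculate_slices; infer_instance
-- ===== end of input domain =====

-- B replaces A's condition/break while-loop by computing the slice count up front
-- (ceiling division) and generating the intervals directly by index (objective: simpler).

def MAX_SLICE_HEIGHT : Int := 2500

def OVERLAP : Int := 100

-- ===== PORT A =====
-- the while-loop of A, with its accumulator `slices`
def calcSlicesLoop (total_height start : Int) (slices : List (Int × Int)) : List (Int × Int) :=
  if start < total_height then
    if min (start + MAX_SLICE_HEIGHT) total_height < total_height then
      calcSlicesLoop total_height (min (start + MAX_SLICE_HEIGHT) total_height - OVERLAP)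
        (slices ++ [(start, min (start + MAX_SLICE_HEIGHT) total_height)])
    else slices ++ [(start, min (start + MAX_SLICE_HEIGHT) total_height)]
  else slices
termination_by (total_height - start).toNat
decreasing_by simp only [MAX_SLICE_HEIGHT, OVERLAP] at *; omega

def calculate_slices (total_height : Int) : List (Int × Int) :=
  calcSlicesLoop total_height 0 []

-- ===== PORT B =====
def calculate_slices_alt (total_height : Int) : List (Int × Int) :=
  if total_height ≤ 0 then []
  else
    let step := MAX_SLICE_HEIGHT - OVERLAP
    let extra := max 0 (-(PySem.Int.floordiv (-(total_height - MAX_SLICE_HEIGHT)) step))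
    (PySem.List.pyRange 0 (extra + 1) 1).map
      (fun i => (i * step, min (i * step + MAX_SLICE_HEIGHT) total_height))

-- ===== PRECONDITION & SPEC =====
def Spec_calculate_slices (total_height : Int) (out : List (Int × Int)) : Prop := out = calculate_slices_alt total_height
instance (total_height : Int) (out : List (Int × Int)) : Decidable (Spec_calculate_slices total_height out) := by unfold Spec_calculate_slices; infer_instance

-- ===== CLAIM (what is proved, stated in full; the proofs are below) =====
def Claim_equal_calculate_slices : Prop := ∀ (total_height : Int), Dom_calculate_slices total_height → Spec_calculate_slices total_height (calculate_slices total_height)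

-- ===== LEMMAS AND PROOFS =====

-- A's loop, started at 2400*j, produces exactly the index-generated slices j..E.
lemma calcSlicesLoop_eq (total E : Int) (ht : 0 < total)
    (hhi : total ≤ 2400 * E + 2500)
    (hlo : 2400 * (E - 1) + 2500 < total ∨ E = 0) (hE : 0 ≤ E) :
    ∀ j, 0 ≤ j → j ≤ E → ∀ acc : List (Int × Int),
      calcSlicesLoop total (2400 * j) acc
        = acc ++ (PySem.List.pyRange j (E + 1) 1).map
            (fun i => (i * 2400, min (i * 2400 + 2500) total)) := by
  intro j hj0 hjE
  induction hn : (E - j).toNat generalizing j with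
  | zero =>
    intro acc
    have hjE' : j = E := by omega
    subst hjE'
    have hlt : 2400 * j < total := by rcases hlo with h | h <;> omega
    rw [calcSlicesLoop.eq_def]
    simp only [MAX_SLICE_HEIGHT, OVERLAP, if_pos hlt]
    have hmin : min (2400 * j + 2500) total = total := by omega
    rw [hmin, if_neg (by omega), PySem.List.pyRange_one_singleton]
    simp only [List.map_cons, List.map_nil]
    have h2 : min (j * 2400 + 2500) total = total := by omega
    rw [h2]
    ring_nf
  | succ n ih =>
    intro acc
    have hjE' : j < E := by omega
    have hlt : 2400 * j < total := by rcases hlo with h | h <;> omega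
    have hc : 2400 * j + 2500 < total := by rcases hlo with h | h <;> omega
    rw [calcSlicesLoop.eq_def]
    simp only [MAX_SLICE_HEIGHT, OVERLAP, if_pos hlt]
    have hmin : min (2400 * j + 2500) total = 2400 * j + 2500 := by omega
    rw [hmin, if_pos (by omega)]
    have harg : 2400 * j + 2500 - 100 = 2400 * (j + 1) := by ring
    rw [harg, ih (j + 1) (by omega) (by omega) (by omega)]
    rw [PySem.List.pyRange_one_cons (show j < E + 1 by omega)]
    simp only [List.map_cons, List.append_assoc, List.singleton_append]
    have h2 : min (j * 2400 + 2500) total = j * 2400 + 2500 := by omega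
    rw [h2]
    ring_nf

-- ===== VERDICT (by name: the statement is the Claim_ definition above) =====
theorem calculate_slices_spec : Claim_equal_calculate_slices := by
  intro total _
  unfold Spec_calculate_slices calculate_slices calculate_slices_alt
  by_cases ht : total ≤ 0
  · rw [calcSlicesLoop.eq_def]
    simp only [MAX_SLICE_HEIGHT, OVERLAP]
    rw [if_neg (by omega), if_pos ht]
  · replace ht : 0 < total := by omega
    simp only [MAX_SLICE_HEIGHT, OVERLAP, if_neg (by omega : ¬ total ≤ 0)]
    set q : Int := -(PySem.Int.floordiv (-(total - 2500)) (2500 - 100)) with hq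
    have hbr : (q - 1) * (2500 - 100) < total - 2500 ∧ total - 2500 ≤ q * (2500 - 100) :=
      (PySem.Int.neg_floordiv_neg_eq_iff_of_pos (by norm_num)).mp hq.symm
    set E : Int := max 0 q with hE
    have h1 : total ≤ 2400 * E + 2500 := by rcases hbr with ⟨ha, hb⟩; omega
    have h2 : 2400 * (E - 1) + 2500 < total ∨ E = 0 := by
      rcases hbr with ⟨ha, hb⟩
      by_cases h : q ≤ 0
      · right; omega
      · left; omega
    have := calcSlicesLoop_eq total E ht h1 h2 (by omega) 0 le_rfl (by omega) []
    simpa using this
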